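-- pv_equiv track=rewrite | github.com/zayatnik/dyplom | main.py | clean_the_most_important_connections
-- ===== SOURCE A (Python) =====
-- def clean_the_most_important_connections(the_most_important_connections: list) -> list:
--     res = [[], []]
--     for i in range(len(the_most_important_connections[0])):
--         index = 0
--         for j in res[1]:
--             if the_most_important_connections[1][i] < j:
--                 index += 1
--             if the_most_important_connections[1][i] >= j or index > 2:
--                 break
--         if index < 3 and the_most_important_connections[1][i] > 0:
--             res = [res[0][:index] + [the_most_important_connections[0][i]] + res[0][index:2], res[1][:index] +
--                    [the_most_important_connections[1][i]] + res[1][index:2]]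
--     return res
-- ===== SOURCE B (Python) =====
-- def clean_the_most_important_connections(the_most_important_connections: list) -> list:
--     names = the_most_important_connections[0]
--     pairs = [(the_most_important_connections[1][i], i, names[i])
--              for i in range(len(names)) if the_most_important_connections[1][i] > 0]
--     pairs.sort(key=lambda p: (-p[0], -p[1]))
--     top = pairs[:3]
--     return [[p[2] for p in top], [p[0] for p in top]]
-- ===== Notes on version B (the rewrite author's own statement) =====
-- stated objective: simpler
-- what changed: A maintains a capped top-3 buffer with a hand-rolled break-early insertion scan and list splicing per element; B builds all positive (weight, index, name) triples in one comprehension, sorts once by (-weight, -index), and takes the first three.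
import Mathlib
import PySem

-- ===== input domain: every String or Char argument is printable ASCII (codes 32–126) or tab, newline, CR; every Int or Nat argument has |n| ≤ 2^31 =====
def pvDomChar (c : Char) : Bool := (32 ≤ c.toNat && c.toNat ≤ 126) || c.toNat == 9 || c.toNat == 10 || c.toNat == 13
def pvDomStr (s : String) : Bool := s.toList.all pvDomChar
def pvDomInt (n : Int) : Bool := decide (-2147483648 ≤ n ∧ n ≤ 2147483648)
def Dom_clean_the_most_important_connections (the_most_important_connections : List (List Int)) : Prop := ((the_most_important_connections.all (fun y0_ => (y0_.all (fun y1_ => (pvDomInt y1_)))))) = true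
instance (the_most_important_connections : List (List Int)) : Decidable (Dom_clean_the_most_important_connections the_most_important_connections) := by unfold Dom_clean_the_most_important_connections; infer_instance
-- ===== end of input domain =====

-- B replaces A's capped in-place insertion into a top-3 buffer by: collect all positive-weight
-- (weight, index, name) triples, sort once by (-weight, -index), take the first 3 (objective: simpler).

-- ===== PORT A =====
-- inner `for j in res[1]` loop with its two `if`s and the `break`
def pvIdxLoop (w : Int) : List Int → Int → Int
  | [], index => index
  | j :: rest, index =>
    let index' := if w < j then index + 1 else index
    if w ≥ j ∨ index' > 2 then index' else pvIdxLoop w rest index'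

-- body of the outer `for i in range(...)` loop; res is the pair (res[0], res[1])
def pvStepA (t : List (List Int)) (res : List Int × List Int) (i : Int) : List Int × List Int :=
  let w := PySem.List.pyGetD (PySem.List.pyGetD t 1 []) i 0
  let index := pvIdxLoop w res.2 0
  if index < 3 ∧ w > 0 then
    (PySem.List.slice res.1 none (some index) ++ [PySem.List.pyGetD (PySem.List.pyGetD t 0 []) i 0] ++ PySem.List.slice res.1 (some index) (some 2),
     PySem.List.slice res.2 none (some index) ++ [w] ++ PySem.List.slice res.2 (some index) (some 2))
  else res

def clean_the_most_important_connections (the_most_important_connections : List (List Int)) : List (List Int) :=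
  let res := (PySem.List.pyRange 0 ((PySem.List.pyGetD the_most_important_connections 0 []).length : Int) 1).foldl
    (pvStepA the_most_important_connections) ([], [])
  [res.1, res.2]

-- ===== PORT B =====
-- the sort key `lambda p: (-p[0], -p[1])` (Python compares tuples lexicographically)
def pvKey (p : Int × Int × Int) : Lex (Int × Int) := toLex (-p.1, -p.2.1)

def clean_the_most_important_connections_alt (the_most_important_connections : List (List Int)) : List (List Int) :=
  let names := PySem.List.pyGetD the_most_important_connections 0 []
  let pairs := ((PySem.List.pyRange 0 (names.length : Int) 1).filter
      (fun i => decide (PySem.List.pyGetD (PySem.List.pyGetD the_most_important_connections 1 []) i 0 > 0))).map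
      (fun i => (PySem.List.pyGetD (PySem.List.pyGetD the_most_important_connections 1 []) i 0, i, PySem.List.pyGetD names i 0))
  let top := (PySem.List.sorted pairs pvKey false).take 3
  [top.map (fun p => p.2.2), top.map (fun p => p.1)]

-- ===== PRECONDITION & SPEC =====
-- Pre_ excludes exactly the inputs on which the Python A raises IndexError: the empty outer list,
-- and inputs whose first sublist is nonempty but with no (or a shorter) second sublist.
def Pre_clean_the_most_important_connections (the_most_important_connections : List (List Int)) : Prop :=
  the_most_important_connections ≠ [] ∧
    ((the_most_important_connections.getD 0 []).length = 0 ∨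
      (2 ≤ the_most_important_connections.length ∧
        (the_most_important_connections.getD 0 []).length ≤ (the_most_important_connections.getD 1 []).length))
instance (the_most_important_connections : List (List Int)) : Decidable (Pre_clean_the_most_important_connections the_most_important_connections) := by unfold Pre_clean_the_most_important_connections; infer_instance

def pvWitness_clean_the_most_important_connections : List (List Int) := [[10, 20, 30, 40], [5, 1, -2, 5]]

def Spec_clean_the_most_important_connections (the_most_important_connections : List (List Int)) (out : List (List Int)) : Prop := out = clean_the_most_important_connections_alt the_most_important_connections
instance (the_most_important_connections : List (List Int)) (out : List (List Int)) : Decidable (Spec_clean_the_most_important_connections the_most_important_connections out) := by unfold Spec_clean_the_most_important_connections; infer_instance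

-- ===== CLAIM (what is proved, stated in full; the proofs are below) =====
def Claim_equal_clean_the_most_important_connections : Prop := ∀ (the_most_important_connections : List (List Int)), Dom_clean_the_most_important_connections the_most_important_connections → Pre_clean_the_most_important_connections the_most_important_connections → Spec_clean_the_most_important_connections the_most_important_connections (clean_the_most_important_connections the_most_important_connections)

-- ===== LEMMAS AND PROOFS =====

-- model: ordered insertion (ascending in pvKey), characterising A's top-3 buffer
def pvIns (x : Int × Int × Int) : List (Int × Int × Int) → List (Int × Int × Int)
  | [] => [x]
  | y :: ys => if pvKey y < pvKey x then y :: pvIns x ys else x :: y :: ys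

def pvPair (names ws : List Int) (i : Nat) : Int × Int × Int := (ws.getD i 0, (i : Int), names.getD i 0)

def pvPairs (names ws : List Int) (k : Nat) : List (Int × Int × Int) :=
  ((List.range k).filter (fun i => decide (0 < ws.getD i 0))).map (pvPair names ws)

def pvS (names ws : List Int) (k : Nat) : List (Int × Int × Int) :=
  (pvPairs names ws k).foldl (fun acc x => pvIns x acc) []

lemma pvKey_lt_iff (y : Int × Int × Int) (x : Int × Int × Int) (h : y.2.1 < x.2.1) :
    (pvKey y < pvKey x) ↔ x.1 < y.1 := by
  simp [pvKey, Prod.Lex.toLex_lt_toLex]; omega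

lemma pvIns_perm (x : Int × Int × Int) (L : List (Int × Int × Int)) : (pvIns x L).Perm (x :: L) := by
  induction L with
  | nil => simp [pvIns]
  | cons y ys ih =>
    simp only [pvIns]
    split
    · exact (ih.cons y).trans (List.Perm.swap x y ys)
    · exact List.Perm.refl _

lemma pvIns_pairwise (x : Int × Int × Int) (L : List (Int × Int × Int))
    (hL : L.Pairwise (fun a b => pvKey a < pvKey b))
    (hne : ∀ y ∈ L, pvKey y ≠ pvKey x) :
    (pvIns x L).Pairwise (fun a b => pvKey a < pvKey b) := by
  induction L with
  | nil => simp [pvIns]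
  | cons y ys ih =>
    rcases List.pairwise_cons.mp hL with ⟨hy, hys⟩
    simp only [pvIns]
    split
    · rename_i hlt
      refine List.pairwise_cons.mpr ⟨?_, ih hys (fun z hz => hne z (by simp [hz]))⟩
      intro z hz
      rcases List.mem_cons.mp ((pvIns_perm x ys).mem_iff.mp hz) with h | h
      · subst h; exact hlt
      · exact hy z h
    · rename_i hnlt
      have hxy : pvKey x < pvKey y := lt_of_le_of_ne (le_of_not_gt hnlt) (Ne.symm (hne y (by simp)))
      refine List.pairwise_cons.mpr ⟨?_, hL⟩
      intro z hz
      rcases List.mem_cons.mp hz with h | h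
      · subst h; exact hxy
      · exact hxy.trans (hy z h)

lemma take_pvIns (n : Nat) (x : Int × Int × Int) (S : List (Int × Int × Int)) :
    (pvIns x S).take n = (pvIns x (S.take n)).take n := by
  induction S generalizing n with
  | nil => simp
  | cons y ys ih =>
    cases n with
    | zero => simp
    | succ m =>
      simp only [pvIns, List.take_succ_cons]
      split
      · simp only [pvIns, List.take_succ_cons]
        rw [ih m]
      · cases m with
        | zero => simp [pvIns]
        | succ m' =>
          simp only [pvIns, List.take_succ_cons, List.take_take]
          rw [Nat.min_eq_left (by omega)]

lemma pvPairs_succ (names ws : List Int) (k : Nat) :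
    pvPairs names ws (k + 1) =
      pvPairs names ws k ++ (if 0 < ws.getD k 0 then [pvPair names ws k] else []) := by
  by_cases h : 0 < ws.getD k 0 <;>
    simp_all [pvPairs, List.range_succ, List.filter_append, List.getD_eq_getElem?_getD]

lemma pvS_succ (names ws : List Int) (k : Nat) :
    pvS names ws (k + 1) =
      if 0 < ws.getD k 0 then pvIns (pvPair names ws k) (pvS names ws k) else pvS names ws k := by
  simp only [pvS, pvPairs_succ, List.foldl_append]
  split <;> simp

lemma pvS_perm (names ws : List Int) (k : Nat) : (pvS names ws k).Perm (pvPairs names ws k) := by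
  induction k with
  | zero => simp [pvS, pvPairs]
  | succ k ih =>
    rw [pvS_succ, pvPairs_succ]
    split
    · exact ((pvIns_perm _ _).trans (ih.cons _)).trans (List.perm_append_singleton _ _).symm
    · simpa using ih

lemma pvS_mem_idx (names ws : List Int) (k : Nat) :
    ∀ y ∈ pvS names ws k, y.2.1 < (k : Int) ∧ ∃ i : Nat, y.2.1 = (i : Int) := by
  intro y hy
  have := (pvS_perm names ws k).mem_iff.mp hy
  simp only [pvPairs, List.mem_map, List.mem_filter, List.mem_range] at this
  obtain ⟨i, ⟨hik, _⟩, rfl⟩ := this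
  exact ⟨by simp [pvPair]; exact_mod_cast hik, i, by simp [pvPair]⟩

lemma pvS_pairwise (names ws : List Int) (k : Nat) :
    (pvS names ws k).Pairwise (fun a b => pvKey a < pvKey b) := by
  induction k with
  | zero => simp [pvS, pvPairs]
  | succ k ih =>
    rw [pvS_succ]
    split
    · refine pvIns_pairwise _ _ ih ?_
      intro y hy hkey
      have h := (pvS_mem_idx names ws k y hy).1
      have : y.2.1 = (pvPair names ws k).2.1 := by
        have := congrArg (fun q => (ofLex q).2) hkey
        simp [pvKey] at this
        omega
      simp [pvPair] at this
      omega
    · exact ih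

lemma stepA_ins (ι w nm : Int) (t : List (Int × Int × Int))
    (hlen : t.length ≤ 3)
    (hidx : ∀ y ∈ t, y.2.1 < ι) (hw : 0 < w) :
    (let index := pvIdxLoop w (t.map (fun p => p.1)) 0
     if index < 3 ∧ w > 0 then
       (PySem.List.slice (t.map (fun p => p.2.2)) none (some index) ++ [nm] ++ PySem.List.slice (t.map (fun p => p.2.2)) (some index) (some 2),
        PySem.List.slice (t.map (fun p => p.1)) none (some index) ++ [w] ++ PySem.List.slice (t.map (fun p => p.1)) (some index) (some 2))
     else (t.map (fun p => p.2.2), t.map (fun p => p.1))) =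
    (((pvIns (w, ι, nm) t).take 3).map (fun p => p.2.2), ((pvIns (w, ι, nm) t).take 3).map (fun p => p.1)) := by
  match t, hlen with
  | [], _ => simp [pvIdxLoop, pvIns, PySem.List.slice, hw]
  | [a], _ =>
    have ha := pvKey_lt_iff a (w, ι, nm) (hidx a (by simp))
    by_cases h1 : w < a.1
    · have hk := ha.mpr h1
      have h1' : ¬ a.1 ≤ w := not_le.mpr h1
      simp [pvIdxLoop, pvIns, hk, h1, h1', hw, PySem.List.slice_toNat, PySem.List.slice_to]
    · have hk : ¬ pvKey a < pvKey (w, ι, nm) := fun h => h1 (ha.mp h)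
      have h1' : a.1 ≤ w := not_lt.mp h1
      simp [pvIdxLoop, pvIns, hk, h1, h1', hw, PySem.List.slice_toNat, PySem.List.slice_to]
  | [a, b], _ =>
    have ha := pvKey_lt_iff a (w, ι, nm) (hidx a (by simp))
    have hb := pvKey_lt_iff b (w, ι, nm) (hidx b (by simp))
    by_cases h1 : w < a.1 <;> by_cases h2 : w < b.1
    · have hka := ha.mpr h1; have hkb := hb.mpr h2
      have h1' : ¬ a.1 ≤ w := not_le.mpr h1; have h2' : ¬ b.1 ≤ w := not_le.mpr h2
      simp [pvIdxLoop, pvIns, hka, hkb, h1, h2, h1', h2', hw, PySem.List.slice_toNat, PySem.List.slice_to]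
    · have hka := ha.mpr h1; have hkb : ¬ pvKey b < pvKey (w, ι, nm) := fun h => h2 (hb.mp h)
      have h1' : ¬ a.1 ≤ w := not_le.mpr h1; have h2' : b.1 ≤ w := not_lt.mp h2
      simp [pvIdxLoop, pvIns, hka, hkb, h1, h2, h1', h2', hw, PySem.List.slice_toNat, PySem.List.slice_to]
    · have hka : ¬ pvKey a < pvKey (w, ι, nm) := fun h => h1 (ha.mp h); have hkb := hb.mpr h2
      have h1' : a.1 ≤ w := not_lt.mp h1; have h2' : ¬ b.1 ≤ w := not_le.mpr h2
      simp [pvIdxLoop, pvIns, hka, hkb, h1, h2, h1', h2', hw, PySem.List.slice_toNat, PySem.List.slice_to]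
    · have hka : ¬ pvKey a < pvKey (w, ι, nm) := fun h => h1 (ha.mp h)
      have hkb : ¬ pvKey b < pvKey (w, ι, nm) := fun h => h2 (hb.mp h)
      have h1' : a.1 ≤ w := not_lt.mp h1; have h2' : b.1 ≤ w := not_lt.mp h2
      simp [pvIdxLoop, pvIns, hka, hkb, h1, h2, h1', h2', hw, PySem.List.slice_toNat, PySem.List.slice_to]
  | [a, b, c], _ =>
    have ha := pvKey_lt_iff a (w, ι, nm) (hidx a (by simp))
    have hb := pvKey_lt_iff b (w, ι, nm) (hidx b (by simp))
    have hc := pvKey_lt_iff c (w, ι, nm) (hidx c (by simp))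
    by_cases h1 : w < a.1 <;> by_cases h2 : w < b.1 <;> by_cases h3 : w < c.1 <;>
      [ (have hka := ha.mpr h1; have hkb := hb.mpr h2; have hkc := hc.mpr h3;
         have h1' : ¬ a.1 ≤ w := not_le.mpr h1; have h2' : ¬ b.1 ≤ w := not_le.mpr h2; have h3' : ¬ c.1 ≤ w := not_le.mpr h3;
         simp [pvIdxLoop, pvIns, hka, hkb, hkc, h1, h2, h3, h1', h2', h3', hw, PySem.List.slice_toNat, PySem.List.slice_to]);
        (have hka := ha.mpr h1; have hkb := hb.mpr h2; have hkc : ¬ pvKey c < pvKey (w, ι, nm) := fun h => h3 (hc.mp h);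
         have h1' : ¬ a.1 ≤ w := not_le.mpr h1; have h2' : ¬ b.1 ≤ w := not_le.mpr h2; have h3' : c.1 ≤ w := not_lt.mp h3;
         simp [pvIdxLoop, pvIns, hka, hkb, hkc, h1, h2, h3, h1', h2', h3', hw, PySem.List.slice_toNat, PySem.List.slice_to]);
        (have hka := ha.mpr h1; have hkb : ¬ pvKey b < pvKey (w, ι, nm) := fun h => h2 (hb.mp h); have hkc := hc.mpr h3;
         have h1' : ¬ a.1 ≤ w := not_le.mpr h1; have h2' : b.1 ≤ w := not_lt.mp h2; have h3' : ¬ c.1 ≤ w := not_le.mpr h3;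
         simp [pvIdxLoop, pvIns, hka, hkb, hkc, h1, h2, h3, h1', h2', h3', hw, PySem.List.slice_toNat, PySem.List.slice_to]);
        (have hka := ha.mpr h1; have hkb : ¬ pvKey b < pvKey (w, ι, nm) := fun h => h2 (hb.mp h); have hkc : ¬ pvKey c < pvKey (w, ι, nm) := fun h => h3 (hc.mp h);
         have h1' : ¬ a.1 ≤ w := not_le.mpr h1; have h2' : b.1 ≤ w := not_lt.mp h2; have h3' : c.1 ≤ w := not_lt.mp h3;
         simp [pvIdxLoop, pvIns, hka, hkb, hkc, h1, h2, h3, h1', h2', h3', hw, PySem.List.slice_toNat, PySem.List.slice_to]);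
        (have hka : ¬ pvKey a < pvKey (w, ι, nm) := fun h => h1 (ha.mp h); have hkb := hb.mpr h2; have hkc := hc.mpr h3;
         have h1' : a.1 ≤ w := not_lt.mp h1; have h2' : ¬ b.1 ≤ w := not_le.mpr h2; have h3' : ¬ c.1 ≤ w := not_le.mpr h3;
         simp [pvIdxLoop, pvIns, hka, hkb, hkc, h1, h2, h3, h1', h2', h3', hw, PySem.List.slice_toNat, PySem.List.slice_to]);
        (have hka : ¬ pvKey a < pvKey (w, ι, nm) := fun h => h1 (ha.mp h); have hkb := hb.mpr h2; have hkc : ¬ pvKey c < pvKey (w, ι, nm) := fun h => h3 (hc.mp h);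
         have h1' : a.1 ≤ w := not_lt.mp h1; have h2' : ¬ b.1 ≤ w := not_le.mpr h2; have h3' : c.1 ≤ w := not_lt.mp h3;
         simp [pvIdxLoop, pvIns, hka, hkb, hkc, h1, h2, h3, h1', h2', h3', hw, PySem.List.slice_toNat, PySem.List.slice_to]);
        (have hka : ¬ pvKey a < pvKey (w, ι, nm) := fun h => h1 (ha.mp h); have hkb : ¬ pvKey b < pvKey (w, ι, nm) := fun h => h2 (hb.mp h); have hkc := hc.mpr h3;
         have h1' : a.1 ≤ w := not_lt.mp h1; have h2' : b.1 ≤ w := not_lt.mp h2; have h3' : ¬ c.1 ≤ w := not_le.mpr h3;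
         simp [pvIdxLoop, pvIns, hka, hkb, hkc, h1, h2, h3, h1', h2', h3', hw, PySem.List.slice_toNat, PySem.List.slice_to]);
        (have hka : ¬ pvKey a < pvKey (w, ι, nm) := fun h => h1 (ha.mp h); have hkb : ¬ pvKey b < pvKey (w, ι, nm) := fun h => h2 (hb.mp h); have hkc : ¬ pvKey c < pvKey (w, ι, nm) := fun h => h3 (hc.mp h);
         have h1' : a.1 ≤ w := not_lt.mp h1; have h2' : b.1 ≤ w := not_lt.mp h2; have h3' : c.1 ≤ w := not_lt.mp h3;
         simp [pvIdxLoop, pvIns, hka, hkb, hkc, h1, h2, h3, h1', h2', h3', hw, PySem.List.slice_toNat, PySem.List.slice_to])]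

lemma loopA (names ws : List Int) (rest : List (List Int)) (k : Nat) :
    (List.range k).foldl (fun res i => pvStepA (names :: ws :: rest) res ((i : Nat) : Int)) ([], []) =
      (((pvS names ws k).take 3).map (fun p => p.2.2), ((pvS names ws k).take 3).map (fun p => p.1)) := by
  induction k with
  | zero => simp [pvS, pvPairs]
  | succ k ih =>
    rw [List.range_succ, List.foldl_append, ih]
    simp only [List.foldl_cons, List.foldl_nil]
    rw [pvS_succ]
    have hA : PySem.List.pyGetD (names :: ws :: rest) 1 ([] : List Int) = ws := by
      simp [PySem.List.pyGetD, PySem.List.pyGet?, PySem.List.pyIdx?]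
    have hB : PySem.List.pyGetD (names :: ws :: rest) 0 ([] : List Int) = names := by
      simp [PySem.List.pyGetD_zero_cons]
    have hwk : PySem.List.pyGetD ws ((k : Nat) : Int) 0 = ws.getD k 0 := by simp
    have hnk : PySem.List.pyGetD names ((k : Nat) : Int) 0 = names.getD k 0 := by simp
    by_cases hpos : 0 < ws.getD k 0
    · rw [if_pos hpos, take_pvIns 3]
      simp only [pvPair]
      have hmem : ∀ y ∈ (pvS names ws k).take 3, y.2.1 < (k : Int) := by
        intro y hy
        exact (pvS_mem_idx names ws k y (List.mem_of_mem_take hy)).1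
      have h := stepA_ins (k : Int) (ws.getD k 0) (names.getD k 0) ((pvS names ws k).take 3)
        (by simp) hmem hpos
      simp only [pvStepA, hA, hB, hwk, hnk]
      exact h
    · rw [if_neg hpos]
      simp only [pvStepA, hA, hwk]
      rw [if_neg (fun hc => hpos hc.2)]


lemma ports_eq_cons (names ws : List Int) (rest : List (List Int)) :
    clean_the_most_important_connections (names :: ws :: rest) =
      clean_the_most_important_connections_alt (names :: ws :: rest) := by
  have h0 : PySem.List.pyGetD (names :: ws :: rest) 0 ([] : List Int) = names := by
    simp [PySem.List.pyGetD_zero_cons]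
  have h1 : PySem.List.pyGetD (names :: ws :: rest) 1 ([] : List Int) = ws := by
    simp [PySem.List.pyGetD, PySem.List.pyGet?, PySem.List.pyIdx?]
  have hsorted : PySem.List.sorted (pvPairs names ws names.length) pvKey false =
      pvS names ws names.length :=
    PySem.List.sorted_eq_of_perm_of_pairwise_lt _ _ _ (pvS_perm names ws names.length)
      (pvS_pairwise names ws names.length)
  simp only [clean_the_most_important_connections, clean_the_most_important_connections_alt, h0, h1]
  rw [PySem.List.pyRange_zero_natCast, List.foldl_map, loopA names ws rest names.length]
  have hpairs : (((List.range names.length).map (fun k => ((k : Nat) : Int))).filter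
        (fun i => decide (PySem.List.pyGetD ws i 0 > 0))).map
        (fun i => (PySem.List.pyGetD ws i 0, i, PySem.List.pyGetD names i 0)) =
      pvPairs names ws names.length := by
    rw [List.filter_map, List.map_map]
    simp [Function.comp_def, pvPairs, pvPair, List.getD_eq_getElem?_getD]
  rw [hpairs, hsorted]

-- ===== VERDICT (by name: the statement is the Claim_ definition above) =====
theorem clean_the_most_important_connections_spec : Claim_equal_clean_the_most_important_connections := by
  intro t _ hpre
  unfold Spec_clean_the_most_important_connections
  rcases t with _ | ⟨names, rest⟩
  · exact absurd rfl hpre.1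
  · rcases rest with _ | ⟨ws, rest⟩
    · rcases hpre.2 with h | h
      · have : names = [] := by simpa using h
        subst this; rfl
      · simp at h
    · exact ports_eq_cons names ws rest
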